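-- pv_equiv track=rewrite | github.com/CaltechOpticalObservatories/ether-cat-soft | helpers2.py | concatenateBits
-- ===== SOURCE A (Python) =====
-- def concatenateBits(nums: list[int], dataLengths: list[int] | int) -> int:
--     """Combines multiple numbers together through bit concatenation into a single number with a total
--     number of bits equal to the sum of the lengths of each data type rounded to the nearest 2^n."""
--
--     if isinstance(dataLengths, int):
--         dataLengths = [dataLengths]
--
--     result = 0
--     for i, num in enumerate(nums): # for each number
--         result <<= dataLengths[i] # shift the result to the left by the length of the current number
--         result |= num # bitwise OR the current number with the result
--     return result
-- ===== SOURCE B (Python) =====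
-- def concatenateBits(nums: list[int], dataLengths: list[int] | int) -> int:
--     """Same result as A: precompute suffix bit-offsets, then OR each number shifted
--     into place in a single pass (shift distributes over OR)."""
--     if isinstance(dataLengths, int):
--         dataLengths = [dataLengths]
--
--     n = len(nums)
--     lens = [dataLengths[i] for i in range(n)]  # same IndexError as A when too short
--
--     # offsets[i] = sum of lens[i+1:]
--     offsets = []
--     acc = 0
--     for d in reversed(lens):
--         offsets.append(acc)
--         acc += d
--     offsets.reverse()
--
--     result = 0
--     for i in range(n):
--         result |= nums[i] << offsets[i]
--     return result
-- ===== Notes on version B (the rewrite author's own statement) =====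
-- stated objective: alternative
-- what changed: B precomputes the suffix bit-offset of every position (sum of the later dataLengths, bounded by len(nums)) and builds the result in one pass by ORing each number shifted to its offset, instead of A's repeated shift-the-accumulator-then-OR loop; exact because left-shift distributes over OR.
-- outside the precondition, e.g. on concatenateBits([1, 2, 3], [4, 4]): A raises IndexError, B raises IndexError; on concatenateBits([1, 2], [-1, 4]): A raises ValueError, B returns 18
import Mathlib
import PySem

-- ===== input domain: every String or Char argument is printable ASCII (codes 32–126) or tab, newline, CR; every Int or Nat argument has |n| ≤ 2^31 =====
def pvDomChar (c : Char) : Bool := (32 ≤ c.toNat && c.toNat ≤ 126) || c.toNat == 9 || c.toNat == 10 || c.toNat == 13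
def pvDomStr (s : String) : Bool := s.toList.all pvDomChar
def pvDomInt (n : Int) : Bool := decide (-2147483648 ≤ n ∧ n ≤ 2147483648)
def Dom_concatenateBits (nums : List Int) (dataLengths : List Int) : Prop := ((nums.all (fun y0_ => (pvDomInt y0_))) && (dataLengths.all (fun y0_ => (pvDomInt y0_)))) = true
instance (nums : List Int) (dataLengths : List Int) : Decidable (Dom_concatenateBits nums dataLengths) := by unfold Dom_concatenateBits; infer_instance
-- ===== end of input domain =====

-- B replaces A's shift-the-accumulator loop by precomputed suffix bit-offsets and one pass
-- of ORing each number shifted into place (alternative decomposition, same cost).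

-- ===== PORT A =====
def concatenateBits (nums : List Int) (dataLengths : List Int) : Int :=
  (PySem.List.enumerate nums).foldl
    (fun result p =>
      PySem.Int.bor (result <<< (PySem.List.pyGetD dataLengths p.1 0).toNat) p.2) 0

-- ===== PORT B =====
def concatenateBits_alt (nums : List Int) (dataLengths : List Int) : Int :=
  let n := nums.length
  let lens := (List.range n).map (fun i => PySem.List.pyGetD dataLengths (Int.ofNat i) 0)
  let st := lens.reverse.foldl
    (fun (st : Int × List Int) d => (st.1 + d, st.2 ++ [st.1])) (0, ([] : List Int))
  let offsets := st.2.reverse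
  (List.range' 0 n).foldl
    (fun result i =>
      PySem.Int.bor result
        ((PySem.List.pyGetD nums (Int.ofNat i) 0) <<< (PySem.List.pyGetD offsets (Int.ofNat i) 0).toNat)) 0

-- ===== PRECONDITION & SPEC =====
-- Pre_ excludes exactly the inputs where Python A raises: IndexError when dataLengths is
-- shorter than nums, ValueError (negative shift count) when a used dataLength is negative.
def Pre_concatenateBits (nums : List Int) (dataLengths : List Int) : Prop :=
  nums.length ≤ dataLengths.length ∧ ∀ d ∈ dataLengths.take nums.length, 0 ≤ d
instance (nums : List Int) (dataLengths : List Int) : Decidable (Pre_concatenateBits nums dataLengths) := by unfold Pre_concatenateBits; infer_instance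

def pvWitness_concatenateBits : List Int × List Int := ([3, 5], [4, 4])

def Spec_concatenateBits (nums : List Int) (dataLengths : List Int) (out : Int) : Prop := out = concatenateBits_alt nums dataLengths
instance (nums : List Int) (dataLengths : List Int) (out : Int) : Decidable (Spec_concatenateBits nums dataLengths out) := by unfold Spec_concatenateBits; infer_instance

-- ===== CLAIM (what is proved, stated in full; the proofs are below) =====
def Claim_equal_concatenateBits : Prop := ∀ (nums : List Int) (dataLengths : List Int), Dom_concatenateBits nums dataLengths → Pre_concatenateBits nums dataLengths → Spec_concatenateBits nums dataLengths (concatenateBits nums dataLengths)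

-- ===== LEMMAS AND PROOFS =====

lemma pvAddOr : ∀ (x : Nat), ∀ (y : Nat), x &&& y = 0 → x + y = x ||| y := by
  intro x
  induction x using Nat.binaryRec with
  | zero => simp
  | bit b n ih =>
    intro y
    induction y using Nat.binaryRec with
    | zero => simp
    | bit b' m _ =>
      intro h
      rw [Nat.land_bit, Nat.bit_eq_zero_iff] at h
      have h2 := ih m h.1
      have hb : (b && b') = false := h.2
      rw [Nat.lor_bit, Nat.bit_val, Nat.bit_val, Nat.bit_val]
      cases b <;> cases b' <;> simp at hb ⊢ <;> omega
lemma aux1 (a : Nat) : Nat.ldiff 0 a = 0 := by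
  apply Nat.eq_of_testBit_eq; intro i; simp [Nat.testBit_ldiff]
lemma aux2 (a : Nat) : Nat.ldiff a 0 = a := by
  apply Nat.eq_of_testBit_eq; intro i; simp [Nat.testBit_ldiff]
lemma pvLdiffAdd : ∀ (m : Nat), ∀ (a : Nat), Nat.ldiff m a + (m &&& a) = m := by
  intro m
  induction m using Nat.binaryRec with
  | zero =>
    intro a; simp [aux1]
  | bit b n ih =>
    intro a
    induction a using Nat.binaryRec with
    | zero => simp [aux2]
    | bit b' m _ =>
      rw [Nat.ldiff_bit, Nat.land_bit]
      have h2 := ih m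
      rw [Nat.bit_val, Nat.bit_val, Nat.bit_val]
      cases b <;> cases b' <;> simp <;> omega
lemma pvMulPow (q k : Nat) : (q + 1) * 2 ^ k - 1 = (q <<< k) ||| (2 ^ k - 1) := by
  have hdisj : q <<< k &&& (2 ^ k - 1) = 0 := by
    apply Nat.eq_of_testBit_eq
    intro i
    simp [Nat.testBit_shiftLeft]
    intro h1 h2; omega
  rw [← pvAddOr _ _ hdisj, Nat.shiftLeft_eq]
  have : (1:Nat) ≤ 2 ^ k := Nat.one_le_two_pow
  ring_nf
  omega
lemma pvSubAnd (m a : Nat) : m - (m &&& a) = Nat.ldiff m a := by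
  have h1 := pvLdiffAdd m a; omega
lemma pvBorPN (m n : Nat) : PySem.Int.bor (m : Int) (-((n : Int) + 1)) = -(((Nat.ldiff n m : Nat) : Int) + 1) := by
  simp only [PySem.Int.bor]
  rw [if_pos (by positivity), if_neg (by omega)]
  have h2 : (- -((n:Int)+1) - 1).toNat = n := by omega
  rw [h2, Int.toNat_natCast, pvSubAnd]
  omega
lemma pvBorNP (m n : Nat) : PySem.Int.bor (-((m : Int) + 1)) (n : Int) = -(((Nat.ldiff m n : Nat) : Int) + 1) := by
  simp only [PySem.Int.bor]
  rw [if_neg (by omega), if_pos (by positivity)]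
  have h2 : (- -((m:Int)+1) - 1).toNat = m := by omega
  rw [h2, Int.toNat_natCast, pvSubAnd]
  omega
lemma pvBorNN2 (m n : Nat) : PySem.Int.bor (-((m : Int) + 1)) (-((n : Int) + 1)) = -(((m &&& n : Nat) : Int) + 1) := by
  simp only [PySem.Int.bor]
  rw [if_neg (by omega), if_neg (by omega)]
  have h2 : (- -((m:Int)+1) - 1).toNat = m := by omega
  have h3 : (- -((n:Int)+1) - 1).toNat = n := by omega
  rw [h2, h3]
  omega
lemma pvNatEq3 (X Y : Nat) (h : X = Y) : -((X:Int)+1) = -((Y:Int)+1) := by rw [h]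
lemma pvBorAssoc (a b c : Int) : PySem.Int.bor (PySem.Int.bor a b) c = PySem.Int.bor a (PySem.Int.bor b c) := by
  cases a with
  | ofNat m =>
    cases b with
    | ofNat n =>
      cases c with
      | ofNat k =>
        simp [Int.ofNat_eq_natCast, Nat.lor_assoc]
      | negSucc k =>
        simp only [Int.ofNat_eq_natCast, Int.negSucc_eq, PySem.Int.bor_natCast, pvBorPN]
        apply pvNatEq3
        apply Nat.eq_of_testBit_eq; intro i
        simp only [Nat.testBit_ldiff, Nat.testBit_lor, Nat.testBit_land]
        cases m.testBit i <;> cases n.testBit i <;> cases k.testBit i <;> rfl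
    | negSucc n =>
      cases c with
      | ofNat k =>
        simp only [Int.ofNat_eq_natCast, Int.negSucc_eq, PySem.Int.bor_natCast, pvBorPN, pvBorNP]
        apply pvNatEq3
        apply Nat.eq_of_testBit_eq; intro i
        simp only [Nat.testBit_ldiff, Nat.testBit_lor, Nat.testBit_land]
        cases m.testBit i <;> cases n.testBit i <;> cases k.testBit i <;> rfl
      | negSucc k =>
        simp only [Int.ofNat_eq_natCast, Int.negSucc_eq, PySem.Int.bor_natCast, pvBorPN, pvBorNP, pvBorNN2]
        apply pvNatEq3
        apply Nat.eq_of_testBit_eq; intro i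
        simp only [Nat.testBit_ldiff, Nat.testBit_lor, Nat.testBit_land]
        cases m.testBit i <;> cases n.testBit i <;> cases k.testBit i <;> rfl
  | negSucc m =>
    cases b with
    | ofNat n =>
      cases c with
      | ofNat k =>
        simp only [Int.ofNat_eq_natCast, Int.negSucc_eq, PySem.Int.bor_natCast, pvBorPN, pvBorNP]
        apply pvNatEq3
        apply Nat.eq_of_testBit_eq; intro i
        simp only [Nat.testBit_ldiff, Nat.testBit_lor, Nat.testBit_land]
        cases m.testBit i <;> cases n.testBit i <;> cases k.testBit i <;> rfl
      | negSucc k =>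
        simp only [Int.ofNat_eq_natCast, Int.negSucc_eq, PySem.Int.bor_natCast, pvBorPN, pvBorNP, pvBorNN2]
        apply pvNatEq3
        apply Nat.eq_of_testBit_eq; intro i
        simp only [Nat.testBit_ldiff, Nat.testBit_lor, Nat.testBit_land]
        cases m.testBit i <;> cases n.testBit i <;> cases k.testBit i <;> rfl
    | negSucc n =>
      cases c with
      | ofNat k =>
        simp only [Int.ofNat_eq_natCast, Int.negSucc_eq, PySem.Int.bor_natCast, pvBorPN, pvBorNP, pvBorNN2]
        apply pvNatEq3
        apply Nat.eq_of_testBit_eq; intro i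
        simp only [Nat.testBit_ldiff, Nat.testBit_lor, Nat.testBit_land]
        cases m.testBit i <;> cases n.testBit i <;> cases k.testBit i <;> rfl
      | negSucc k =>
        simp only [Int.ofNat_eq_natCast, Int.negSucc_eq, PySem.Int.bor_natCast, pvBorPN, pvBorNP, pvBorNN2]
        apply pvNatEq3
        apply Nat.eq_of_testBit_eq; intro i
        simp only [Nat.testBit_ldiff, Nat.testBit_lor, Nat.testBit_land]
        cases m.testBit i <;> cases n.testBit i <;> cases k.testBit i <;> rfl
lemma pvS1 (m n k : Nat) : (m ||| n) * 2^k = (m * 2^k) ||| (n * 2^k) := by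
  rw [← Nat.shiftLeft_eq, ← Nat.shiftLeft_eq, ← Nat.shiftLeft_eq]
  apply Nat.eq_of_testBit_eq; intro i
  simp only [Nat.testBit_lor, Nat.testBit_shiftLeft]
  by_cases h : k ≤ i <;> simp [h]
lemma pvS2 (m n k : Nat) : (Nat.ldiff n m + 1) * 2^k - 1 = Nat.ldiff ((n+1) * 2^k - 1) (m * 2^k) := by
  rw [pvMulPow, pvMulPow, ← Nat.shiftLeft_eq]
  apply Nat.eq_of_testBit_eq; intro i
  simp only [Nat.testBit_ldiff, Nat.testBit_lor, Nat.testBit_shiftLeft, Nat.testBit_two_pow_sub_one]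
  by_cases h : k ≤ i
  · have h2 : ¬ (i < k) := by omega
    simp [h, h2]
  · have h2 : i < k := by omega
    simp [h, h2]
lemma pvS3 (m n k : Nat) : ((m &&& n) + 1) * 2^k - 1 = ((m+1) * 2^k - 1) &&& ((n+1) * 2^k - 1) := by
  rw [pvMulPow, pvMulPow, pvMulPow]
  apply Nat.eq_of_testBit_eq; intro i
  simp only [Nat.testBit_land, Nat.testBit_lor, Nat.testBit_shiftLeft, Nat.testBit_two_pow_sub_one]
  by_cases h : k ≤ i
  · have h2 : ¬ (i < k) := by omega
    simp [h, h2]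
  · have h2 : i < k := by omega
    simp [h, h2]
lemma pvNegMul (m k : Nat) : -((m:Int)+1) * 2^k = -((((m+1) * 2^k - 1 : Nat) : Int) + 1) := by
  have h2 : (1:Nat) ≤ (m+1) * 2^k := Nat.one_le_iff_ne_zero.mpr (by positivity)
  rw [Nat.cast_sub h2]
  push_cast
  ring
lemma pvPosMul (m k : Nat) : ((m:Int)) * 2^k = ((m * 2^k : Nat) : Int) := by push_cast; ring
lemma pvShiftBor (a b : Int) (k : Nat) :
    (PySem.Int.bor a b) <<< k = PySem.Int.bor (a <<< k) (b <<< k) := by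
  rw [Int.shiftLeft_eq, Int.shiftLeft_eq, Int.shiftLeft_eq]
  cases a with
  | ofNat m =>
    cases b with
    | ofNat n =>
      simp only [Int.ofNat_eq_natCast, PySem.Int.bor_natCast, pvPosMul, PySem.Int.bor_natCast]
      rw [pvS1]
    | negSucc n =>
      simp only [Int.ofNat_eq_natCast, Int.negSucc_eq, pvBorPN, pvNegMul, pvPosMul, pvBorPN]
      exact pvNatEq3 _ _ (pvS2 m n k)
  | negSucc m =>
    cases b with
    | ofNat n =>
      simp only [Int.ofNat_eq_natCast, Int.negSucc_eq, pvBorNP, pvNegMul, pvPosMul, pvBorNP]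
      exact pvNatEq3 _ _ (pvS2 n m k)
    | negSucc n =>
      simp only [Int.negSucc_eq, pvBorNN2, pvNegMul, pvBorNN2]
      exact pvNatEq3 _ _ (pvS3 m n k)
def pvT2 : List Int → List Int → Nat
  | _ :: ns, d :: ds => d.toNat + pvT2 ns ds
  | _, _ => 0
def pvG : List Int → List Int → Int
  | num :: ns, _ :: ds => PySem.Int.bor (num <<< pvT2 ns ds) (pvG ns ds)
  | _, _ => 0
lemma pvBorZeroLeft (a : Int) : PySem.Int.bor 0 a = a := by
  rw [PySem.Int.bor_comm, PySem.Int.bor_zero]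
lemma pvA_zip : ∀ (ns ds : List Int) (acc : Int),
    (ns.zip ds).foldl (fun r p => PySem.Int.bor (r <<< p.2.toNat) p.1) acc
      = PySem.Int.bor (acc <<< pvT2 ns ds) (pvG ns ds) := by
  intro ns
  induction ns with
  | nil => intro ds acc; simp [pvT2, pvG, PySem.Int.bor_zero]
  | cons num ns ih =>
    intro ds acc
    cases ds with
    | nil => simp [pvT2, pvG, PySem.Int.bor_zero]
    | cons d ds =>
      simp only [List.zip_cons_cons, List.foldl_cons, ih]
      simp only [Int.shiftLeft_natCast_right, pvT2, pvG]
      rw [pvShiftBor, ← Int.shiftLeft_add, pvBorAssoc]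
lemma pvA_enum (dataLengths : List Int) :
    ∀ (ns : List Int) (k : Nat) (acc : Int), k + ns.length ≤ dataLengths.length →
    (PySem.List.enumerate ns (k : Int)).foldl
      (fun r p => PySem.Int.bor (r <<< (PySem.List.pyGetD dataLengths p.1 0).toNat) p.2) acc
      = (ns.zip (dataLengths.drop k)).foldl (fun r p => PySem.Int.bor (r <<< p.2.toNat) p.1) acc := by
  intro ns
  induction ns with
  | nil => intro k acc h; simp [PySem.List.enumerate]
  | cons x ns ih =>
    intro k acc h
    have hk : k < dataLengths.length := by simp at h; omega
    have he : PySem.List.enumerate (x::ns) (k : Int) = ((k:Int), x) :: PySem.List.enumerate ns ((k:Int)+1) := by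
      simp [PySem.List.enumerate]
    rw [he, List.drop_eq_getElem_cons hk]
    simp only [List.zip_cons_cons, List.foldl_cons]
    have hg : PySem.List.pyGetD dataLengths (k:Int) 0 = dataLengths[k] := by
      rw [PySem.List.pyGetD_natCast]
      exact List.getD_eq_getElem _ _ hk
    rw [hg]
    have hcast : ((k:Int)+1) = ((k+1 : Nat) : Int) := by push_cast; ring
    rw [hcast, ih (k+1) _ (by simp at h ⊢; omega)]
    rw [Int.shiftLeft_natCast_right]
lemma pvLens (dataLengths : List Int) (n : Nat) (h : n ≤ dataLengths.length) :
    (List.range n).map (fun i => PySem.List.pyGetD dataLengths (Int.ofNat i) 0) = dataLengths.take n := by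
  apply List.ext_getElem
  · simp; omega
  · intro i h1 h2
    simp only [List.getElem_map, List.getElem_range, List.getElem_take]
    simp at h1
    rw [Int.ofNat_eq_natCast, PySem.List.pyGetD_natCast]
    exact List.getD_eq_getElem _ _ (by omega)
def pvSufs : List Int → List Int
  | [] => []
  | _ :: ds => ds.sum :: pvSufs ds
lemma pvSufs_length (l : List Int) : (pvSufs l).length = l.length := by
  induction l with
  | nil => rfl
  | cons d t ih => simp [pvSufs, ih]
lemma pvO (l : List Int) :
    l.reverse.foldl (fun (st : Int × List Int) d => (st.1 + d, st.2 ++ [st.1])) (0, ([] : List Int))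
      = (l.sum, (pvSufs l).reverse) := by
  induction l with
  | nil => simp [pvSufs]
  | cons d t ih =>
    simp only [List.reverse_cons, List.foldl_append, ih, List.foldl_cons, List.foldl_nil,
      pvSufs, List.sum_cons]
    rw [Prod.mk.injEq]
    exact ⟨by ring, by simp⟩
lemma pvFoldBor {α : Type} (g : α → Int) : ∀ (l : List α) (acc : Int),
    l.foldl (fun r p => PySem.Int.bor r (g p)) acc
      = PySem.Int.bor acc (l.foldl (fun r p => PySem.Int.bor r (g p)) 0) := by
  intro l
  induction l with
  | nil => intro acc; simp [PySem.Int.bor_zero]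
  | cons x t ih =>
    intro acc
    simp only [List.foldl_cons]
    rw [ih, ih (PySem.Int.bor 0 (g x)), pvBorZeroLeft, pvBorAssoc]
lemma pvB_idx (xs os : List Int) :
    ∀ (m s : Nat) (acc : Int), xs.length = s + m → s + m ≤ os.length →
    (List.range' s m).foldl
      (fun r i => PySem.Int.bor r
        ((PySem.List.pyGetD xs (Int.ofNat i) 0) <<< (PySem.List.pyGetD os (Int.ofNat i) 0).toNat)) acc
      = ((xs.drop s).zip (os.drop s)).foldl
          (fun r p => PySem.Int.bor r (p.1 <<< p.2.toNat)) acc := by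
  intro m
  induction m with
  | zero =>
    intro s acc h1 h2
    rw [List.drop_eq_nil_of_le (by omega)]
    simp
  | succ m ih =>
    intro s acc h1 h2
    have hx : s < xs.length := by omega
    have ho : s < os.length := by omega
    rw [List.range'_succ, List.foldl_cons, List.drop_eq_getElem_cons hx, List.drop_eq_getElem_cons ho]
    simp only [List.zip_cons_cons, List.foldl_cons]
    have g1 : PySem.List.pyGetD xs (Int.ofNat s) 0 = xs[s] := by
      rw [Int.ofNat_eq_natCast, PySem.List.pyGetD_natCast]
      exact List.getD_eq_getElem _ _ hx
    have g2 : PySem.List.pyGetD os (Int.ofNat s) 0 = os[s] := by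
      rw [Int.ofNat_eq_natCast, PySem.List.pyGetD_natCast]
      exact List.getD_eq_getElem _ _ ho
    rw [g1, g2, ih (s+1) _ (by omega) (by omega)]
lemma pvSumT2 : ∀ (ns ds : List Int), ns.length = ds.length → (∀ d ∈ ds, 0 ≤ d) →
    (ds.sum).toNat = pvT2 ns ds := by
  intro ns
  induction ns with
  | nil =>
    intro ds h hnn
    cases ds with
    | nil => simp [pvT2]
    | cons d t => simp at h
  | cons num ns ih =>
    intro ds h hnn
    cases ds with
    | nil => simp at h
    | cons d t =>
      simp only [List.sum_cons, pvT2]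
      have h1 : 0 ≤ d := hnn d (by simp)
      have h2 : 0 ≤ t.sum := List.sum_nonneg (fun x hx => hnn x (by simp [hx]))
      have h3 := ih t (by simpa using h) (fun x hx => hnn x (by simp [hx]))
      omega
lemma pvGB : ∀ (ns ds : List Int), ns.length = ds.length → (∀ d ∈ ds, 0 ≤ d) →
    (ns.zip (pvSufs ds)).foldl (fun r p => PySem.Int.bor r (p.1 <<< p.2.toNat)) 0 = pvG ns ds := by
  intro ns
  induction ns with
  | nil => intro ds h hnn; simp [pvG]
  | cons num ns ih =>
    intro ds h hnn
    cases ds with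
    | nil => simp at h
    | cons d t =>
      simp only [pvSufs, List.zip_cons_cons, List.foldl_cons, pvG]
      rw [pvFoldBor (fun p : Int × Int => p.1 <<< p.2.toNat), pvBorZeroLeft,
        ih t (by simpa using h) (fun x hx => hnn x (by simp [hx]))]
      rw [pvSumT2 ns t (by simpa using h) (fun x hx => hnn x (by simp [hx]))]
lemma pvT2_take : ∀ (ns ds : List Int), pvT2 ns (ds.take ns.length) = pvT2 ns ds := by
  intro ns
  induction ns with
  | nil => intro ds; simp [pvT2]
  | cons num ns ih =>
    intro ds
    cases ds with
    | nil => simp [pvT2]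
    | cons d t => simp only [List.length_cons, List.take_succ_cons, pvT2, ih]
lemma pvG_take : ∀ (ns ds : List Int), pvG ns (ds.take ns.length) = pvG ns ds := by
  intro ns
  induction ns with
  | nil => intro ds; simp [pvG]
  | cons num ns ih =>
    intro ds
    cases ds with
    | nil => simp [pvG]
    | cons d t => simp only [List.length_cons, List.take_succ_cons, pvG, ih, pvT2_take]

lemma pvA_main (nums dataLengths : List Int) (hlen : nums.length ≤ dataLengths.length) :
    concatenateBits nums dataLengths = pvG nums dataLengths := by
  unfold concatenateBits
  rw [show PySem.List.enumerate nums 0 = PySem.List.enumerate nums ((0:Nat):Int) from rfl,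
    pvA_enum dataLengths nums 0 0 (by omega), List.drop_zero, pvA_zip]
  rw [show ((0:Int) <<< pvT2 nums dataLengths) = 0 from by rw [Int.shiftLeft_eq]; ring]
  exact pvBorZeroLeft _

lemma pvB_main (nums dataLengths : List Int) (hlen : nums.length ≤ dataLengths.length)
    (hnn : ∀ d ∈ dataLengths.take nums.length, 0 ≤ d) :
    concatenateBits_alt nums dataLengths = pvG nums dataLengths := by
  unfold concatenateBits_alt
  simp only [pvLens dataLengths nums.length hlen, pvO, List.reverse_reverse]
  rw [pvB_idx nums (pvSufs (dataLengths.take nums.length)) nums.length 0 0 (by omega)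
    (by rw [pvSufs_length]; simp; omega)]
  simp only [List.drop_zero]
  rw [pvGB nums (dataLengths.take nums.length) (by simp; omega) hnn]
  exact pvG_take nums dataLengths

-- ===== VERDICT (by name: the statement is the Claim_ definition above) =====
theorem concatenateBits_spec : Claim_equal_concatenateBits := by
  intro nums dataLengths _hdom hpre
  obtain ⟨hlen, hnn⟩ := hpre
  unfold Spec_concatenateBits
  rw [pvA_main nums dataLengths hlen, pvB_main nums dataLengths hlen hnn]
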